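-- pv_equiv track=rewrite | github.com/jalenfran/DiffSense | backend/src/embedding_engine.py | _clean_commit_message
-- ===== SOURCE A (Python) =====
-- def _clean_commit_message(message: str) -> str:
--     """Clean and normalize commit message"""
--     # Remove common prefixes and normalize
--     lines = message.split('\n')
--     first_line = lines[0].strip()
--
--     # Remove common prefixes
--     prefixes = ['fix:', 'feat:', 'docs:', 'style:', 'refactor:', 'test:', 'chore:']
--     for prefix in prefixes:
--         if first_line.lower().startswith(prefix):
--             first_line = first_line[len(prefix):].strip()
--             break
--
--     return first_line
-- ===== SOURCE B (Python) =====
-- PREFIX_WORDS = {'fix', 'feat', 'docs', 'style', 'refactor', 'test', 'chore'}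
--
--
-- def _clean_commit_message(message: str) -> str:
--     """Clean and normalize commit message"""
--     first_line = message.split('\n')[0].strip()
--     head, sep, rest = first_line.partition(':')
--     if sep == ':' and head.lower() in PREFIX_WORDS:
--         return rest.strip()
--     return first_line
-- ===== Notes on version B (the rewrite author's own statement) =====
-- stated objective: simpler
-- what changed: B replaces A's loop over seven startswith tests against colon-terminated prefixes by a single partition at the first colon followed by one membership test of the lowercased head in a set of seven prefix words.
import Mathlib
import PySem

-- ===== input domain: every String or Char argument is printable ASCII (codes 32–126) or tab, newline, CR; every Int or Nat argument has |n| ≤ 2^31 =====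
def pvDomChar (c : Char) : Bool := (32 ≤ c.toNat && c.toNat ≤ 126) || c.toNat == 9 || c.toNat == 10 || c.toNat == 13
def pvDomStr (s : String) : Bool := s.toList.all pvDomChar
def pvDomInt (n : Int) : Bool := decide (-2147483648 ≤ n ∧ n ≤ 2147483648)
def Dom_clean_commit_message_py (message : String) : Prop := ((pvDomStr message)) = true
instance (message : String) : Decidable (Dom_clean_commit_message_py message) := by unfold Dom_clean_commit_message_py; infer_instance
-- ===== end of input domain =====

-- B replaces A's seven startswith scans by one partition at the first colon and a single
-- membership test of the lowercased head in a set of prefix words (objective: simpler).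

-- ===== PORT A =====
-- lines = message.split('\n'); first_line = lines[0].strip()  (identical line in A and B, shared helper)
-- split('\n') always yields a nonempty list, so lines[0] never raises; headD's default is unreachable
def pvFirstLineA (message : String) : List Char :=
  PySem.Chars.strip (((PySem.Chars.split? message.toList ['\n']).getD []).headD [])

-- prefixes = ['fix:', 'feat:', 'docs:', 'style:', 'refactor:', 'test:', 'chore:']
def pvPrefixes : List (List Char) :=
  [['f','i','x',':'], ['f','e','a','t',':'], ['d','o','c','s',':'], ['s','t','y','l','e',':'],
   ['r','e','f','a','c','t','o','r',':'], ['t','e','s','t',':'], ['c','h','o','r','e',':']]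

-- for prefix in prefixes: if first_line.lower().startswith(prefix): first_line = first_line[len(prefix):].strip(); break
def pvStripLoopA : List (List Char) → List Char → List Char
  | [], fl => fl
  | p :: ps, fl =>
    if PySem.Chars.startswith (PySem.Chars.lower fl) p then
      PySem.Chars.strip (PySem.Chars.slice fl (some (p.length : Int)) none)
    else pvStripLoopA ps fl

def clean_commit_message_py (message : String) : String :=
  String.ofList (pvStripLoopA pvPrefixes (pvFirstLineA message))

-- ===== PORT B =====
-- PREFIX_WORDS = {'fix', 'feat', 'docs', 'style', 'refactor', 'test', 'chore'}
def pvPrefixWords : PySem.Set (List Char) :=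
  PySem.Set.ofList [['f','i','x'], ['f','e','a','t'], ['d','o','c','s'], ['s','t','y','l','e'],
    ['r','e','f','a','c','t','o','r'], ['t','e','s','t'], ['c','h','o','r','e']]

-- first_line.partition(':') ported by hand (PySem has no str.partition): split at the first ':';
-- exact: Python returns (s, '', '') when ':' is absent, else (before, ':', after)
def pvPartitionColon (cs : List Char) : List Char × List Char × List Char :=
  let i := PySem.Chars.find cs [':']
  if i = -1 then (cs, [], [])
  else (cs.take i.toNat, [':'], cs.drop (i.toNat + 1))

def clean_commit_message_py_alt (message : String) : String :=
  let fl := pvFirstLineA message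
  let p := pvPartitionColon fl
  if p.2.1 = [':'] ∧ PySem.Chars.lower p.1 ∈ pvPrefixWords then
    String.ofList (PySem.Chars.strip p.2.2)
  else String.ofList fl

-- ===== PRECONDITION & SPEC =====
def Spec_clean_commit_message_py (message : String) (out : String) : Prop := out = clean_commit_message_py_alt message
instance (message : String) (out : String) : Decidable (Spec_clean_commit_message_py message out) := by unfold Spec_clean_commit_message_py; infer_instance

-- ===== CLAIM (what is proved, stated in full; the proofs are below) =====
def Claim_equal_clean_commit_message_py : Prop := ∀ (message : String), Dom_clean_commit_message_py message → Spec_clean_commit_message_py message (clean_commit_message_py message)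

-- ===== LEMMAS AND PROOFS =====

theorem pv_lowerChar_colon (c : Char) : PySem.Chars.lowerChar c = ':' ↔ c = ':' := by
  unfold PySem.Chars.lowerChar PySem.Chars.isupper
  constructor
  · intro h
    split at h
    · next hc =>
      exfalso
      simp only [Bool.and_eq_true, decide_eq_true_eq] at hc
      have h1 : 65 ≤ c.toNat := Nat.succ_le_of_lt hc.1
      have h2 : c.toNat ≤ 90 := hc.2
      have hv : Nat.isValidChar (c.toNat + 32) := Or.inl (by omega)
      have h58 : (Char.ofNat (c.toNat + 32)).toNat = c.toNat + 32 := by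
        rw [Char.toNat_ofNat, if_pos hv]
      have h3 := congrArg Char.toNat h
      rw [h58] at h3
      have : (':' : Char).toNat = 58 := by decide
      omega
    · exact h
  · intro h; subst h; decide

theorem pv_singleton_prefix (l : List Char) (a : Char) : [a] <+: l ↔ l[0]? = some a := by
  cases l <;> simp [List.prefix_cons_iff, eq_comm]

theorem pv_find_colon_eq {fl : List Char} {j : Nat} (h1 : fl[j]? = some ':')
    (h2 : ∀ k < j, fl[k]? ≠ some ':') : PySem.Chars.find fl [':'] = (j : Int) := by
  have hnn : 0 ≤ PySem.Chars.find fl [':'] := by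
    rw [PySem.Chars.find_nonneg_iff]
    have hmem : ':' ∈ fl := List.mem_of_getElem? h1
    obtain ⟨s, t, rfl⟩ := List.append_of_mem hmem
    exact ⟨s, t, by simp⟩
  obtain ⟨hpre, hmin⟩ := PySem.Chars.find_spec hnn
  set i := (PySem.Chars.find fl [':']).toNat with hi
  have hfi : fl[i]? = some ':' := by
    rw [pv_singleton_prefix, List.getElem?_drop] at hpre
    simpa using hpre
  have : i = j := by
    by_contra hne
    rcases Nat.lt_or_ge i j with h | h
    · exact h2 i h hfi
    · have hj : j < i := by omega
      exact hmin j hj (by rw [pv_singleton_prefix, List.getElem?_drop]; simpa using h1)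
  omega

theorem pv_start_iff (fl w : List Char) (hw : ':' ∉ w) :
    PySem.Chars.startswith (PySem.Chars.lower fl) (w ++ [':']) = true ↔
      PySem.Chars.find fl [':'] = (w.length : Int) ∧
        PySem.Chars.lower (fl.take w.length) = w := by
  rw [PySem.Chars.startswith_iff]
  unfold PySem.Chars.lower
  constructor
  · intro h
    have hlen : w.length + 1 ≤ fl.length := by
      have := h.length_le
      simpa using this
    have htake : (List.map PySem.Chars.lowerChar fl).take (w.length + 1) = w ++ [':'] := by
      have := List.prefix_iff_eq_take.mp h
      simpa using this.symm
    have hj : fl[w.length]? = some ':' := by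
      have h0 : (w ++ [':'])[w.length]? = (List.map PySem.Chars.lowerChar fl)[w.length]? := by
        rw [← htake, List.getElem?_take]
        simp
      rw [List.getElem?_map] at h0
      have h1 : (w ++ [':'])[w.length]? = some ':' := by simp
      rw [h1] at h0
      cases hc : fl[w.length]? with
      | none => rw [hc] at h0; simp at h0
      | some c =>
        rw [hc] at h0
        simp only [Option.map_some, Option.some.injEq] at h0
        rw [(pv_lowerChar_colon c).mp h0.symm]
    have hk : ∀ k < w.length, fl[k]? ≠ some ':' := by
      intro k hk hcol
      have h0 : (w ++ [':'])[k]? = (List.map PySem.Chars.lowerChar fl)[k]? := by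
        rw [← htake, List.getElem?_take, if_pos (by omega)]
      rw [List.getElem?_map, hcol, List.getElem?_append_left hk] at h0
      have h0' : w[k]? = some ':' := by
        simpa [show PySem.Chars.lowerChar ':' = ':' from rfl] using h0
      exact hw (List.mem_of_getElem? h0')
    refine ⟨pv_find_colon_eq hj hk, ?_⟩
    have heq : List.map PySem.Chars.lowerChar (fl.take w.length) =
        ((List.map PySem.Chars.lowerChar fl).take (w.length + 1)).take w.length := by
      rw [List.take_take, ← List.map_take]
      congr 2
      omega
    rw [heq, htake]
    simp
  · rintro ⟨hfind, htake⟩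
    have hnn : 0 ≤ PySem.Chars.find fl [':'] := by
      rw [hfind]; exact Int.natCast_nonneg _
    obtain ⟨hpre, -⟩ := PySem.Chars.find_spec hnn
    rw [hfind] at hpre
    simp only [Int.toNat_natCast] at hpre
    rw [pv_singleton_prefix, List.getElem?_drop] at hpre
    simp only [Nat.add_zero] at hpre
    have heq : (List.map PySem.Chars.lowerChar fl).take (w.length + 1) = w ++ [':'] := by
      rw [← List.map_take, List.take_add_one, hpre]
      simp only [List.map_append]
      rw [htake]
      rfl
    exact heq ▸ List.take_prefix _ _
-- helper facts about the first colon position when one exists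
theorem pv_find_colon_lt {fl : List Char} (h : PySem.Chars.find fl [':'] ≠ -1) :
    (PySem.Chars.find fl [':']).toNat < fl.length ∧
      0 ≤ PySem.Chars.find fl [':'] := by
  have hnn : 0 ≤ PySem.Chars.find fl [':'] := by
    have := PySem.Chars.neg_one_le_find (s := fl) (sub := [':'])
    omega
  obtain ⟨hpre, -⟩ := PySem.Chars.find_spec hnn
  have := hpre.length_le
  simp only [List.length_cons, List.length_nil, List.length_drop] at this
  exact ⟨by omega, hnn⟩

theorem pv_loop_eq (ws : List (List Char)) (hws : ∀ w ∈ ws, ':' ∉ w) (fl : List Char) :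
    pvStripLoopA (ws.map (· ++ [':'])) fl =
      (if PySem.Chars.find fl [':'] ≠ -1 ∧
          PySem.Chars.lower (fl.take (PySem.Chars.find fl [':']).toNat) ∈ ws
       then PySem.Chars.strip (fl.drop ((PySem.Chars.find fl [':']).toNat + 1)) else fl) := by
  induction ws with
  | nil => simp [pvStripLoopA]
  | cons w ws ih =>
    have hw : ':' ∉ w := hws w (by simp)
    simp only [List.map_cons, pvStripLoopA]
    by_cases hs : PySem.Chars.startswith (PySem.Chars.lower fl) (w ++ [':']) = true
    · rw [if_pos hs]
      obtain ⟨hfind, htake⟩ := (pv_start_iff fl w hw).mp hs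
      have hne : PySem.Chars.find fl [':'] ≠ -1 := by rw [hfind]; omega
      have htn : (PySem.Chars.find fl [':']).toNat = w.length := by
        rw [hfind]; exact Int.toNat_natCast _
      rw [if_pos ⟨hne, by rw [htn, htake]; exact List.mem_cons_self ..⟩]
      have hsl : PySem.Chars.slice fl (some ((w ++ [':']).length : Int)) none =
          fl.drop (w.length + 1) := by
        rw [PySem.Chars.slice_eq_listSlice, PySem.List.slice_from fl (Int.natCast_nonneg _)]
        simp
      rw [hsl, htn]
    · rw [if_neg hs, ih (fun v hv => hws v (by simp [hv]))]
      by_cases hcond : PySem.Chars.find fl [':'] ≠ -1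
      · obtain ⟨hlt, hnn⟩ := pv_find_colon_lt hcond
        have hne : PySem.Chars.lower (fl.take (PySem.Chars.find fl [':']).toNat) ≠ w := by
          intro he
          apply hs
          have hlen : (PySem.Chars.find fl [':']).toNat = w.length := by
            have := congrArg List.length he
            simp only [PySem.Chars.lower, List.length_map, List.length_take] at this
            omega
          exact (pv_start_iff fl w hw).mpr
            ⟨by rw [← hlen]; exact (Int.toNat_of_nonneg hnn).symm, by rw [← hlen]; exact he⟩
        simp [List.mem_cons, hne]
      · simp [hcond]

-- ===== VERDICT (by name: the statement is the Claim_ definition above) =====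
theorem clean_commit_message_py_spec : Claim_equal_clean_commit_message_py := by
  intro message _
  unfold Spec_clean_commit_message_py clean_commit_message_py clean_commit_message_py_alt
  have h1 : pvPrefixes =
      ([['f','i','x'], ['f','e','a','t'], ['d','o','c','s'], ['s','t','y','l','e'],
        ['r','e','f','a','c','t','o','r'], ['t','e','s','t'], ['c','h','o','r','e']].map
        (· ++ [':'])) := by decide
  rw [h1, pv_loop_eq _ (by decide)]
  set fl := pvFirstLineA message
  unfold pvPartitionColon pvPrefixWords
  by_cases hf : PySem.Chars.find fl [':'] = -1
  · simp [hf]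
  · simp only [hf, if_neg, ne_eq, not_false_eq_true]
    simp only [PySem.Set.mem_ofList, List.mem_cons, List.not_mem_nil, or_false, true_and]
    exact apply_ite String.ofList _ _ _
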